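-- pv_equiv track=rewrite | github.com/klipski/vocabulary | StringComparison.py | word_letter_pairs
-- ===== SOURCE A (Python) =====
-- def letter_pairs(s):
-- 	num_pairs = len(s) - 1
-- 	pairs = []
-- 	for i in range(0, num_pairs):
-- 		pairs.append(s[i:i + 2])
-- 	return pairs
--
-- def word_letter_pairs(s):
-- 	all_pairs = []
-- 	words = s.split(" ")
-- 	for w in words:
-- 		pairs_in_word = letter_pairs(w)
-- 		for p in pairs_in_word:
-- 			all_pairs.append(p)
-- 	return all_pairs
-- ===== SOURCE B (Python) =====
-- def word_letter_pairs(s):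
-- 	return [a + b for a, b in zip(s, s[1:]) if a != ' ' and b != ' ']
-- ===== Notes on version B (the rewrite author's own statement) =====
-- stated objective: idiomatic
-- what changed: Replaces splitting into words plus a nested letter_pairs helper loop by a single zip(s, s[1:]) comprehension that keeps a pair exactly when neither character is a space.
import Mathlib
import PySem

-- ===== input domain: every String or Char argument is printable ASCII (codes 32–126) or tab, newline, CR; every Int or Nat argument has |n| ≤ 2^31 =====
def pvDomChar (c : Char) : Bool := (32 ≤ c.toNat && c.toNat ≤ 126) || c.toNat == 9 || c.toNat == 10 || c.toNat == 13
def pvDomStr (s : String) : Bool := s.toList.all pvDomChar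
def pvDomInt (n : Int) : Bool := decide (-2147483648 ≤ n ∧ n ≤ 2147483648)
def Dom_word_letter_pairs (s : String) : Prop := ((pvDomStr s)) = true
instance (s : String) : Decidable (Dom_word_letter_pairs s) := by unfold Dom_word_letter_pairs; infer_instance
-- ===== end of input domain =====

-- B replaces the word-split plus nested letter_pairs helper loop by a single zip(s, s[1:])
-- comprehension that keeps a pair exactly when neither character is a space (idiomatic, same cost).

-- ===== PORT A =====
def letter_pairs (s : String) : List String :=
  let numPairs : Int := PySem.Str.len s - 1
  (PySem.List.pyRange 0 numPairs 1).foldl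
    (fun pairs i => pairs ++ [PySem.Str.slice s (some i) (some (i + 2))]) []

def word_letter_pairs (s : String) : List String :=
  let words := (PySem.Str.split? s " ").getD []  -- sep " " is nonempty, so split? is never none
  words.foldl (fun allPairs w =>
    (letter_pairs w).foldl (fun allPairs p => allPairs ++ [p]) allPairs) []

-- ===== PORT B =====
-- [a + b for a, b in zip(s, s[1:]) if a != ' ' and b != ' ']
def word_letter_pairs_alt (s : String) : List String :=
  ((s.toList.zip (PySem.Str.slice s (some 1) none).toList).filter
      (fun p => p.1 != ' ' && p.2 != ' ')).map (fun p => String.ofList [p.1, p.2])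

-- ===== PRECONDITION & SPEC =====
def Spec_word_letter_pairs (s : String) (out : List String) : Prop := out = word_letter_pairs_alt s
instance (s : String) (out : List String) : Decidable (Spec_word_letter_pairs s out) := by unfold Spec_word_letter_pairs; infer_instance

-- ===== CLAIM (what is proved, stated in full; the proofs are below) =====
def Claim_equal_word_letter_pairs : Prop := ∀ (s : String), Dom_word_letter_pairs s → Spec_word_letter_pairs s (word_letter_pairs s)

-- ===== LEMMAS AND PROOFS =====

-- adjacent pairs of a word (structural form of letter_pairs)
def pvPairs : List Char → List String
  | a :: b :: r => String.ofList [a, b] :: pvPairs (b :: r)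
  | _ => []

-- guarded single scan (structural form of B)
def pvScan : List Char → List String
  | a :: b :: r => (if a ≠ ' ' ∧ b ≠ ' ' then [String.ofList [a, b]] else []) ++ pvScan (b :: r)
  | _ => []

-- structural form of split(" "): pre is the first piece accumulated so far
def pvSplit : List Char → List Char → List (List Char)
  | pre, [] => [pre]
  | pre, c :: r => if c = ' ' then pre :: pvSplit [] r else pvSplit (pre ++ [c]) r

theorem pv_go_eq (fuel : Nat) : ∀ (l cur : List Char) (acc : List (List Char)),
    l.length < fuel →
    PySem.Chars.splitOn.go [' '] fuel l cur acc = acc.reverse ++ pvSplit cur.reverse l := by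
  induction fuel with
  | zero => intro l cur acc h; omega
  | succ fuel ih =>
    intro l cur acc h
    cases l with
    | nil => rw [PySem.Chars.splitOn.go.eq_def]; simp [pvSplit]
    | cons c rest =>
      by_cases hc : c = ' '
      · have hgo : PySem.Chars.splitOn.go [' '] (fuel + 1) (c :: rest) cur acc
            = PySem.Chars.splitOn.go [' '] fuel rest [] (cur.reverse :: acc) := by
          rw [PySem.Chars.splitOn.go.eq_def]
          simp [hc]
        rw [hgo, ih rest [] (cur.reverse :: acc) (by simp at h; omega)]
        simp [pvSplit, hc]
      · have hgo : PySem.Chars.splitOn.go [' '] (fuel + 1) (c :: rest) cur acc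
            = PySem.Chars.splitOn.go [' '] fuel rest (c :: cur) acc := by
          rw [PySem.Chars.splitOn.go.eq_def]
          simp [List.isPrefixOf, Ne.symm hc]
        rw [hgo, ih rest (c :: cur) acc (by simp at h; omega)]
        simp [pvSplit, hc]

theorem pv_splitOn_eq (cs : List Char) : PySem.Chars.splitOn cs [' '] = pvSplit [] cs := by
  rw [show PySem.Chars.splitOn cs [' '] = PySem.Chars.splitOn.go [' '] (cs.length + 1) cs [] [] from rfl]
  rw [pv_go_eq (cs.length + 1) cs [] [] (by omega)]
  rfl

theorem pv_range_map_pairs (cs : List Char) :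
    (List.range (cs.length - 1)).map (fun k => String.ofList ((cs.drop k).take 2)) = pvPairs cs := by
  induction cs with
  | nil => rfl
  | cons a p ih =>
    cases p with
    | nil => rfl
    | cons b r =>
      simp only [List.length_cons, Nat.add_sub_cancel, List.range_succ_eq_map,
        List.map_cons, List.map_map]
      have hlen : r.length = (b :: r).length - 1 := by simp
      rw [hlen]
      have htail : List.map ((fun k => String.ofList (List.take 2 (List.drop k (a :: b :: r)))) ∘
          Nat.succ) (List.range ((b :: r).length - 1)) = pvPairs (b :: r) := by
        rw [← ih]
        apply List.map_congr_left
        intro k _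
        simp [Function.comp]
      rw [htail]
      simp [pvPairs]

theorem pv_letter_pairs_eq (w : String) : letter_pairs w = pvPairs w.toList := by
  unfold letter_pairs
  rw [PySem.List.foldl_append_singleton_eq_map]
  simp only [PySem.Str.len]
  cases h : w.toList with
  | nil =>
    have h0 : PySem.List.pyRange 0 ((([] : List Char).length : Int) - 1) 1 = [] := by decide
    rw [h0]
    rfl
  | cons a p =>
    have h1 : (((a :: p).length : Int) - 1) = ((p.length : Nat) : Int) := by simp
    rw [h1, PySem.List.pyRange_zero_natCast, List.map_map,
      ← show (a :: p).length - 1 = p.length from by simp, ← pv_range_map_pairs (a :: p)]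
    apply List.map_congr_left
    intro k hk
    simp only [Function.comp, PySem.Str.slice, PySem.Chars.slice_eq_listSlice, h]
    rw [show ((k : Int) + 2) = ((k : Int) + ((2:Nat) : Int)) from by norm_num,
      PySem.List.slice_natCast_add]

theorem pv_scan_space (r : List Char) : pvScan (' ' :: r) = pvScan r := by
  cases r with
  | nil => rfl
  | cons b r => simp [pvScan]

theorem pv_pairs_eq_scan (w : List Char) (h : ' ' ∉ w) : pvPairs w = pvScan w := by
  induction w with
  | nil => rfl
  | cons a p ih =>
    cases p with
    | nil => rfl
    | cons b r =>
      simp only [List.mem_cons, not_or] at h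
      simp [pvPairs, pvScan, Ne.symm h.1, Ne.symm h.2.1,
        ih (by simp only [List.mem_cons, not_or]; exact h.2)]

theorem pv_scan_append_space (pre : List Char) : ∀ r, ' ' ∉ pre →
    pvScan (pre ++ ' ' :: r) = pvPairs pre ++ pvScan (' ' :: r) := by
  induction pre with
  | nil => intro r _; rfl
  | cons a p ih =>
    intro r h
    simp only [List.mem_cons, not_or] at h
    cases p with
    | nil => simp [pvScan, pvPairs, pv_scan_space]
    | cons b q =>
      simp only [List.cons_append]
      rw [show pvScan (a :: b :: (q ++ ' ' :: r)) =
        (if a ≠ ' ' ∧ b ≠ ' ' then [String.ofList [a, b]] else []) ++ pvScan (b :: (q ++ ' ' :: r)) from rfl]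
      rw [show (b :: (q ++ ' ' :: r)) = ((b :: q) ++ ' ' :: r) from rfl]
      rw [ih r h.2]
      have hb : ¬ ' ' = b := by intro e; exact h.2 (List.mem_cons.2 (Or.inl e))
      simp [pvPairs, Ne.symm h.1, Ne.symm hb]

theorem pv_main (l : List Char) : ∀ (pre : List Char), ' ' ∉ pre →
    (pvSplit pre l).flatMap pvPairs = pvScan (pre ++ l) := by
  induction l with
  | nil => intro pre h; simp [pvSplit, pv_pairs_eq_scan pre h]
  | cons c r ih =>
    intro pre h
    by_cases hc : c = ' '
    · subst hc
      simp only [pvSplit, if_true, List.flatMap_cons]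
      rw [ih [] (by simp), pv_scan_append_space pre r h]
      simp [pv_scan_space]
    · simp only [pvSplit, if_neg hc]
      rw [ih (pre ++ [c]) (by simp [h]; exact fun e => hc e.symm)]
      simp

theorem pv_zip_scan (cs : List Char) :
    ((cs.zip cs.tail).filter (fun p => p.1 != ' ' && p.2 != ' ')).map
      (fun p => String.ofList [p.1, p.2]) = pvScan cs := by
  induction cs with
  | nil => rfl
  | cons a p ih =>
    cases p with
    | nil => rfl
    | cons b r =>
      simp only [List.tail_cons, List.zip_cons_cons, List.filter_cons]
      by_cases hg : a ≠ ' ' ∧ b ≠ ' '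
      · rw [if_pos (by simp [hg.1, hg.2])]
        simp only [List.map_cons]
        rw [show (b :: r).zip r = (b :: r).zip (b :: r).tail from rfl, ih]
        simp [pvScan, hg]
      · rw [if_neg (by simpa using fun h1 h2 => hg ⟨h1, h2⟩)]
        rw [show (b :: r).zip r = (b :: r).zip (b :: r).tail from rfl, ih]
        simp [pvScan, hg]

theorem pv_alt_eq (s : String) : word_letter_pairs_alt s = pvScan s.toList := by
  unfold word_letter_pairs_alt
  rw [show (PySem.Str.slice s (some 1) none).toList = s.toList.tail from by
    simp [PySem.Str.slice, PySem.List.slice_from_one]]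
  exact pv_zip_scan s.toList

theorem pv_a_eq (s : String) : word_letter_pairs s = (pvSplit [] s.toList).flatMap pvPairs := by
  unfold word_letter_pairs
  have hsm := PySem.Str.split?_map s " "
  rw [show (" " : String).toList = [' '] from rfl] at hsm
  rw [show PySem.Chars.split? s.toList [' ']
      = some (PySem.Chars.splitOn s.toList [' ']) from by simp [PySem.Chars.split?]] at hsm
  cases hsp : PySem.Str.split? s " " with
  | none => rw [hsp] at hsm; simp at hsm
  | some ws =>
    rw [hsp] at hsm
    simp only [Option.map_some, Option.some_inj] at hsm
    simp only [Option.getD_some]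
    have hinner : ∀ (acc : List String) (w : String),
        (letter_pairs w).foldl (fun a p => a ++ [p]) acc = acc ++ letter_pairs w := by
      intro acc w
      rw [show (fun (a : List String) (p : String) => a ++ [p])
          = (fun a p => a ++ [id p]) from rfl, PySem.List.foldl_append_singleton_eq_map]
      simp
    simp only [hinner]
    rw [PySem.List.foldl_append_eq_flatMap]
    rw [← pv_splitOn_eq, ← hsm]
    simp only [List.nil_append, List.flatMap_map]
    apply List.flatMap_congr
    intro x _
    exact pv_letter_pairs_eq x

-- ===== VERDICT (by name: the statement is the Claim_ definition above) =====
theorem word_letter_pairs_spec : Claim_equal_word_letter_pairs := by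
  intro s _
  unfold Spec_word_letter_pairs
  rw [pv_a_eq, pv_main s.toList [] (by simp), pv_alt_eq]
  rfl
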